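-- pv_equiv track=rewrite | github.com/RMx-03/oncall-env | inference.py | _service_from_statuses
-- ===== SOURCE A (Python) =====
-- from typing import Any, Dict, List, Optional, Tuple
--
-- VALID_SERVICES = {
--     "api-gw",
--     "order-svc",
--     "order-db",
--     "payment-svc",
--     "auth-svc",
--     "notification-svc",
--     "cache",
--     "search-svc",
-- }
--
-- def _service_from_statuses(observation: Dict[str, Any]) -> str:
--     statuses = observation.get("service_statuses") or []
--     for entry in statuses:
--         if isinstance(entry, dict) and entry.get("status") == "down":
--             svc = entry.get("service")
--             if svc in VALID_SERVICES:
--                 return svc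
--     for entry in statuses:
--         if isinstance(entry, dict) and entry.get("status") == "degraded":
--             svc = entry.get("service")
--             if svc in VALID_SERVICES:
--                 return svc
--     return "order-svc"
-- ===== SOURCE B (Python) =====
-- VALID_SERVICES = {
--     "api-gw",
--     "order-svc",
--     "order-db",
--     "payment-svc",
--     "auth-svc",
--     "notification-svc",
--     "cache",
--     "search-svc",
-- }
--
-- def _service_from_statuses(observation):
--     statuses = observation.get("service_statuses") or []
--     first_degraded = None
--     for entry in statuses:
--         if not isinstance(entry, dict):
--             continue
--         svc = entry.get("service")
--         if svc not in VALID_SERVICES: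
--             continue
--         status = entry.get("status")
--         if status == "down":
--             return svc
--         if status == "degraded" and first_degraded is None:
--             first_degraded = svc
--     return first_degraded if first_degraded is not None else "order-svc"
-- ===== Notes on version B (the rewrite author's own statement) =====
-- stated objective: alternative
-- what changed: Replaces A's two sequential scans (one for 'down', one for 'degraded') with a single pass that returns the first valid 'down' service immediately and remembers the first valid 'degraded' service in a local variable.
import Mathlib
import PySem

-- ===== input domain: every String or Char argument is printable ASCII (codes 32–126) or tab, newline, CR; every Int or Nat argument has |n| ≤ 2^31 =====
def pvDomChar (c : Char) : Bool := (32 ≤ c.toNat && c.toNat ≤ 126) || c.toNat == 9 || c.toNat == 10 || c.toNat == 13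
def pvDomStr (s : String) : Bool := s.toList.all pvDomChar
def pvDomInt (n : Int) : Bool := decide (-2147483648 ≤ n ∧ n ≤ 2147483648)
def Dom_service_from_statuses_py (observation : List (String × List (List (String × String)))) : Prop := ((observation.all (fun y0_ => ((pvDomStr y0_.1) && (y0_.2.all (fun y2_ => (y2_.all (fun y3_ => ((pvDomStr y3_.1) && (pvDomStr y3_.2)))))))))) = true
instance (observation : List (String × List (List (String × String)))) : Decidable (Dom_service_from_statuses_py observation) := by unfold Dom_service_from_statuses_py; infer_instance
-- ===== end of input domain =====

-- B differs from A only in structure: one pass instead of two; return value identical.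

-- dict.get(k): first-match lookup in an insertion-order association list (shared by both ports)
def pvGet {α : Type} (d : List (String × α)) (k : String) : Option α :=
  match d with
  | [] => none
  | (k', v) :: rest => if k' = k then some v else pvGet rest k

def validServices : List String :=
  ["api-gw", "order-svc", "order-db", "payment-svc", "auth-svc",
   "notification-svc", "cache", "search-svc"]

-- ===== PORT A =====
-- one 'for entry in statuses' loop of A: first entry whose status equals `target` and whose service is valid
def pyFindStatus (statuses : List (List (String × String))) (target : String) : Option String :=
  match statuses with
  | [] => none
  | e :: rest =>
    if pvGet e "status" = some target then
      match pvGet e "service" with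
      | some s => if validServices.contains s then some s else pyFindStatus rest target
      | none => pyFindStatus rest target
    else pyFindStatus rest target

def service_from_statuses_py (observation : List (String × List (List (String × String)))) : String :=
  let statuses := (pvGet observation "service_statuses").getD []
  match pyFindStatus statuses "down" with
  | some s => s
  | none =>
    match pyFindStatus statuses "degraded" with
    | some s => s
    | none => "order-svc"

-- ===== PORT B =====
-- single pass with a first_degraded accumulator
def altLoop (statuses : List (List (String × String))) (firstDeg : Option String) : String :=
  match statuses with
  | [] =>
    match firstDeg with
    | some d => d
    | none => "order-svc"
  | e :: rest =>
    match pvGet e "service" with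
    | none => altLoop rest firstDeg
    | some s =>
      if validServices.contains s then
        let st := pvGet e "status"
        if st = some "down" then s
        else if st = some "degraded" ∧ firstDeg = none then altLoop rest (some s)
        else altLoop rest firstDeg
      else altLoop rest firstDeg

def service_from_statuses_py_alt (observation : List (String × List (List (String × String)))) : String :=
  altLoop ((pvGet observation "service_statuses").getD []) none

-- ===== PRECONDITION & SPEC =====
def Spec_service_from_statuses_py (observation : List (String × List (List (String × String)))) (out : String) : Prop := out = service_from_statuses_py_alt observation
instance (observation : List (String × List (List (String × String)))) (out : String) : Decidable (Spec_service_from_statuses_py observation out) := by unfold Spec_service_from_statuses_py; infer_instance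

-- ===== CLAIM (what is proved, stated in full; the proofs are below) =====
def Claim_equal_service_from_statuses_py : Prop := ∀ (observation : List (String × List (List (String × String)))), Dom_service_from_statuses_py observation → Spec_service_from_statuses_py observation (service_from_statuses_py observation)

-- ===== LEMMAS AND PROOFS =====
-- loop invariant: the one-pass loop equals "first valid down, else the accumulator, else first valid degraded"
theorem altLoop_eq (statuses : List (List (String × String))) (acc : Option String) :
    altLoop statuses acc =
      match pyFindStatus statuses "down" with
      | some s => s
      | none =>
        match acc with
        | some d => d
        | none =>
          match pyFindStatus statuses "degraded" with
          | some s => s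
          | none => "order-svc" := by
  induction statuses generalizing acc with
  | nil => cases acc <;> simp [altLoop, pyFindStatus]
  | cons e rest ih =>
    by_cases hdown : pvGet e "status" = some "down"
    · cases hsvc : pvGet e "service" with
      | none => simp [altLoop, pyFindStatus, hdown, hsvc, ih]
      | some s =>
        by_cases hv : validServices.contains s <;> simp at hv
        · simp [altLoop, pyFindStatus, hdown, hsvc, hv]
        · simp [altLoop, pyFindStatus, hdown, hsvc, hv, ih]
    · by_cases hdeg : pvGet e "status" = some "degraded"
      · cases hsvc : pvGet e "service" with
        | none => simp [altLoop, pyFindStatus, hdeg, hsvc, ih]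
        | some s =>
          by_cases hv : validServices.contains s <;> simp at hv
          · cases acc <;> simp [altLoop, pyFindStatus, hdeg, hsvc, hv, ih]
          · simp [altLoop, pyFindStatus, hdeg, hsvc, hv, ih]
      · cases hsvc : pvGet e "service" with
        | none => simp [altLoop, pyFindStatus, hdeg, hsvc, ih]
        | some s => simp [altLoop, pyFindStatus, hdown, hdeg, hsvc, ih]

-- ===== VERDICT (by name: the statement is the Claim_ definition above) =====
theorem service_from_statuses_py_spec : Claim_equal_service_from_statuses_py := by
  intro observation _
  unfold Spec_service_from_statuses_py
  simp only [service_from_statuses_py, service_from_statuses_py_alt, altLoop_eq]
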